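-- pv_equiv track=rewrite | github.com/robert-bayer/CPSCIClassWork | IndependentProgrammingPractice5_Robert.py | noNumOneJhasAstP
-- ===== SOURCE A (Python) =====
-- def noNumOneJhasAstP(mystring):
--     correct = {"Ast": True, "Nums": True, "j": True, "P": True}
--     valid = {"Ast": False, "Nums": True, "j": False, "P": False}
--     if "*" in mystring:
--         valid["Ast"] = True
--     if "P" in mystring:
--         valid["P"] = True
--     for char in mystring:
--         if char.isdigit() == True:
--             valid["Nums"] = False
--         if (char == "j" or char == "J") and valid["j"] == False:
--             valid["j"] = True
--         elif (char == "j" or char == "J") and valid["j"] == True: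
--             valid["j"] = False
--     if valid == correct:
--         return f"{mystring} meets the criteria"
--     else:
--         return f"{mystring} does not meet the criteria"
-- ===== SOURCE B (Python) =====
-- def noNumOneJhasAstP(mystring):
--     counts = {}
--     for char in mystring:
--         counts[char] = counts.get(char, 0) + 1
--     ok = (counts.get("*", 0) > 0
--           and counts.get("P", 0) > 0
--           and sum(n for c, n in counts.items() if c.isdigit()) == 0
--           and (counts.get("j", 0) + counts.get("J", 0)) % 2 == 1)
--     verdict = "meets" if ok else "does not meet"
--     return f"{mystring} {verdict} the criteria"
-- ===== Notes on version B (the rewrite author's own statement) =====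
-- stated objective: alternative
-- what changed: Replaces A's dict-of-flags state machine (membership tests plus a per-character toggle/mutation scan) with a character histogram built in one pass; all four criteria are then read off the counts: positive counts for '*' and 'P', zero total over digit keys, and odd count of 'j' plus 'J'.
import Mathlib
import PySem

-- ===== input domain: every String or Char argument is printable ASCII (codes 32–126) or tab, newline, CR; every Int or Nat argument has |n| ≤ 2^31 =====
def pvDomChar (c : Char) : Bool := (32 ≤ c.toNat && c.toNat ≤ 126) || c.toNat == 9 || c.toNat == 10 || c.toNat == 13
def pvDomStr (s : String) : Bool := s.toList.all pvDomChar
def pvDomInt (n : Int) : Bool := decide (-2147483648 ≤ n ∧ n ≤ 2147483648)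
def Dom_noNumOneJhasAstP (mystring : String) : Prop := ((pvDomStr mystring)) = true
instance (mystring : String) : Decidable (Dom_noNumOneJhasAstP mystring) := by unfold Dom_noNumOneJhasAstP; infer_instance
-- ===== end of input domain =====

-- B replaces A's flag-toggling scan with a character histogram built once; all four
-- criteria are then read off the counts (objective: alternative, same O(n) cost).

-- ===== PORT A =====
-- the dict with the four fixed keys "Ast","Nums","j","P" (values Bool), as a record
structure ValidA where
  Ast : Bool
  Nums : Bool
  j : Bool
  P : Bool
deriving DecidableEq, Repr

def correctA : ValidA := ⟨true, true, true, true⟩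

def stepA (v : ValidA) (c : Char) : ValidA :=
  let v := if PySem.Chars.isdigit c then { v with Nums := false } else v
  if ((c == 'j' || c == 'J') && (v.j == false)) then { v with j := true }
  else if ((c == 'j' || c == 'J') && (v.j == true)) then { v with j := false }
  else v

def noNumOneJhasAstP (mystring : String) : String :=
  let valid : ValidA := ⟨false, true, false, false⟩
  let valid := if PySem.Str.isIn "*" mystring then { valid with Ast := true } else valid
  let valid := if PySem.Str.isIn "P" mystring then { valid with P := true } else valid
  let valid := mystring.toList.foldl stepA valid
  if valid = correctA then mystring ++ " meets the criteria"
  else mystring ++ " does not meet the criteria"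

-- ===== PORT B =====
def noNumOneJhasAstP_alt (mystring : String) : String :=
  -- counts[char] = counts.get(char, 0) + 1 over the string
  let counts := mystring.toList.foldl (fun d c => d.insert c (d.getD c 0 + 1)) PySem.Dict.empty
  let ok := decide (0 < counts.getD '*' 0) && decide (0 < counts.getD 'P' 0)
    && (((counts.items.filter (fun p => PySem.Chars.isdigit p.1)).map (fun p => p.2)).sum == 0)
    && (PySem.Int.mod (counts.getD 'j' 0 + counts.getD 'J' 0) 2 == 1)
  let verdict := if ok then "meets" else "does not meet"
  mystring ++ " " ++ verdict ++ " the criteria"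

-- ===== PRECONDITION & SPEC =====
def Spec_noNumOneJhasAstP (mystring : String) (out : String) : Prop := out = noNumOneJhasAstP_alt mystring
instance (mystring : String) (out : String) : Decidable (Spec_noNumOneJhasAstP mystring out) := by unfold Spec_noNumOneJhasAstP; infer_instance

-- ===== CLAIM (what is proved, stated in full; the proofs are below) =====
def Claim_equal_noNumOneJhasAstP : Prop := ∀ (mystring : String), Dom_noNumOneJhasAstP mystring → Spec_noNumOneJhasAstP mystring (noNumOneJhasAstP mystring)

-- ===== LEMMAS AND PROOFS =====

theorem stepA_eq (v : ValidA) (c : Char) :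
    stepA v c = ⟨v.Ast, v.Nums && !PySem.Chars.isdigit c,
      if (c == 'j' || c == 'J') then !v.j else v.j, v.P⟩ := by
  cases v with
  | mk a n j p =>
    unfold stepA
    by_cases hd : PySem.Chars.isdigit c = true <;>
      by_cases hj : (c == 'j' || c == 'J') = true <;>
        cases j <;> simp [hd, hj]

-- A's loop computes: Ast and P unchanged; Nums anded with "no digit seen"; j xored with the parity of the j/J count.
theorem foldl_stepA (l : List Char) (v : ValidA) :
    l.foldl stepA v =
      ⟨v.Ast, v.Nums && !(l.any PySem.Chars.isdigit),
       xor v.j (decide ((l.countP (fun c => c == 'j' || c == 'J')) % 2 = 1)), v.P⟩ := by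
  induction l generalizing v with
  | nil => simp
  | cons c t ih =>
    rw [List.foldl_cons, stepA_eq, ih]
    by_cases hj : (c == 'j' || c == 'J') = true <;>
      cases hv : v.j <;>
        cases hd : PySem.Chars.isdigit c <;>
          cases hn : v.Nums <;>
            rcases Nat.mod_two_eq_zero_or_one (t.countP (fun c => c == 'j' || c == 'J')) with h | h <;>
              simp [hj, hd, h, Nat.add_mod]

-- count 'j' + count 'J' is the countP of A's combined test
theorem count_j_add_J (l : List Char) :
    (l.count 'j' : Int) + l.count 'J' = l.countP (fun c => c == 'j' || c == 'J') := by
  induction l with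
  | nil => simp
  | cons c t ih =>
    by_cases h1 : c = 'j' <;> by_cases h2 : c = 'J' <;>
      simp [h1, h2] <;> omega

-- a sum of strictly-positive counts vanishes only on the empty index list
theorem sum_counts_eq_zero_iff (xs : List Char) (l : List Char) (h : ∀ k ∈ l, k ∈ xs) :
    ((l.map (fun k => (xs.count k : Int))).sum = 0) ↔ l = [] := by
  induction l with
  | nil => simp
  | cons c t ih =>
    have hc : 0 < xs.count c := List.count_pos_iff.mpr (h c (by simp))
    have ht : 0 ≤ (t.map (fun k => (xs.count k : Int))).sum := by
      apply List.sum_nonneg; intro x hx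
      rcases List.mem_map.mp hx with ⟨k, _, rfl⟩; positivity
    simp only [List.map_cons, List.sum_cons, List.cons_ne_nil, iff_false]
    intro habs; omega

-- B's digit-sum is 0 exactly when the string has no digit
theorem digit_sum_eq_zero_iff (xs : List Char) :
    ((((PySem.Dict.counter xs).items.filter (fun p => PySem.Chars.isdigit p.1)).map
        (fun p => p.2)).sum = 0) ↔ (xs.any PySem.Chars.isdigit = false) := by
  rw [PySem.Dict.items_counter, List.filter_map, List.map_map]
  simp only [Function.comp_def]
  rw [sum_counts_eq_zero_iff xs _
    (fun k hk => (PySem.Set.mem_ofList xs k).mp (List.mem_of_mem_filter hk))]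
  rw [List.filter_eq_nil_iff]
  simp only [List.any_eq_false]
  constructor
  · intro h c hc; exact h c ((PySem.Set.mem_ofList xs c).mpr hc)
  · intro h c hc; exact h c ((PySem.Set.mem_ofList xs c).mp hc)

-- 'c in mystring' for one char is list membership
theorem isIn_single (c : Char) (l : List Char) : PySem.Chars.isIn [c] l = true ↔ c ∈ l := by
  rw [PySem.Chars.isIn_iff_infix]
  exact List.singleton_infix_iff c l

-- the two return-string shapes agree
theorem glue (m : String) (b : Bool) :
    m ++ " " ++ (if b then "meets" else "does not meet") ++ " the criteria"
      = if b then m ++ " meets the criteria" else m ++ " does not meet the criteria" := by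
  have h1 : " " ++ ("meets" ++ " the criteria") = " meets the criteria" := by decide
  have h2 : " " ++ ("does not meet" ++ " the criteria") = " does not meet the criteria" := by decide
  cases b <;> simp only [Bool.false_eq_true, if_true, if_false,
    String.append_assoc, h1, h2]

theorem noNumOneJhasAstP_eq (s : String) : noNumOneJhasAstP s = noNumOneJhasAstP_alt s := by
  unfold noNumOneJhasAstP noNumOneJhasAstP_alt
  dsimp only
  rw [foldl_stepA, PySem.Dict.foldl_insert_getD_add_one_eq_counter]
  simp only [PySem.Dict.getD_counter]
  rw [glue]
  refine if_congr ?_ rfl rfl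
  by_cases hA : '*' ∈ s.toList <;>
    by_cases hP : 'P' ∈ s.toList <;>
      by_cases hD : (s.toList.any PySem.Chars.isdigit) = true <;>
        by_cases hJ : ((s.toList.countP (fun c => c == 'j' || c == 'J')) % 2 = 1) <;>
          simp [isIn_single, hA, hP, hD, hJ,
            digit_sum_eq_zero_iff, correctA, ValidA.mk.injEq] <;>
            (rw [count_j_add_J s.toList]; omega)

-- ===== VERDICT (by name: the statement is the Claim_ definition above) =====
theorem noNumOneJhasAstP_spec : Claim_equal_noNumOneJhasAstP := by
  intro s _
  exact noNumOneJhasAstP_eq s
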